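-- pv_equiv track=rewrite | github.com/ijaz-44/automation-database | my_automation_backup/project_scanner.py | extract_py_summary
-- ===== SOURCE A (Python) =====
-- def extract_py_summary(lines):
--     """Extract only essential info from Python file."""
--     classes = [l.strip() for l in lines if l.strip().startswith('class ')][:5]
--     funcs = [l.strip() for l in lines if l.strip().startswith('def ')][:5]
--     imports = [l.strip() for l in lines if l.strip().startswith(('import ', 'from '))][:5]
--     logic = []
--     for l in lines:
--         s = l.strip()
--         if any(k in s.lower() for k in ['rsi', 'ema', 'macd', 'score', 'signal', 'buy', 'sell']):
--             logic.append(s[:80])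
--             if len(logic) >= 5:
--                 break
--     return classes, funcs, imports, logic
-- ===== SOURCE B (Python) =====
-- KEYWORDS = ['rsi', 'ema', 'macd', 'score', 'signal', 'buy', 'sell']
--
-- def extract_py_summary(lines):
--     """Extract only essential info from Python file (single pass)."""
--     classes, funcs, imports, logic = [], [], [], []
--     for l in lines:
--         s = l.strip()
--         if len(classes) < 5 and s.startswith('class '):
--             classes.append(s)
--         if len(funcs) < 5 and s.startswith('def '):
--             funcs.append(s)
--         if len(imports) < 5 and (s.startswith('import ') or s.startswith('from ')):
--             imports.append(s)
--         if len(logic) < 5: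
--             lower = s.lower()
--             if any(k in lower for k in KEYWORDS):
--                 logic.append(s[:80])
--     return classes, funcs, imports, logic
-- ===== Notes on version B (the rewrite author's own statement) =====
-- stated objective: alternative
-- what changed: Replaced A's four separate scans over the lines (three list comprehensions plus a breaking loop) by one single pass that strips each line once and maintains four independently capped (<5) accumulators.
import Mathlib
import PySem

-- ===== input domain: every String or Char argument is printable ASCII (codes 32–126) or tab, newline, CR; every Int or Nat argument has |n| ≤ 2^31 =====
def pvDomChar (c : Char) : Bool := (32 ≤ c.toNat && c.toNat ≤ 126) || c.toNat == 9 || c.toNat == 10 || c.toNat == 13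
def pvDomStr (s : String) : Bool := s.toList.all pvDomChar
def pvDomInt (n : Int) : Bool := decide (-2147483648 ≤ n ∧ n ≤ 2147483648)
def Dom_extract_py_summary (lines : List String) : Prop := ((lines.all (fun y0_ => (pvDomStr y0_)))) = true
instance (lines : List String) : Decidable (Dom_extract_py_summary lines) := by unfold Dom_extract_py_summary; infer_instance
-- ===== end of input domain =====

-- B replaces A's four separate scans over the lines by a single pass carrying four capped
-- accumulators (objective: simpler/alternative; same asymptotic cost, one traversal instead of four).

-- ===== PORT A =====

-- the keyword list of A's `any(k in s.lower() for k in [...])`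
def pvKwList : List String := ["rsi", "ema", "macd", "score", "signal", "buy", "sell"]

-- `any(k in s.lower() for k in pvKwList)`
def pvHasKw (s : String) : Bool := pvKwList.any (fun k => PySem.Str.isIn k (PySem.Str.lower s))

-- A's final loop: append s[:80] when a keyword matches, break once len(logic) >= 5
def pvLogicLoopA : List String → List String → List String
  | [], logic => logic
  | l :: ls, logic =>
    let s := PySem.Str.strip l
    if pvHasKw s then
      let logic' := logic ++ [PySem.Str.slice s none (some 80)]
      if 5 ≤ logic'.length then logic' else pvLogicLoopA ls logic'
    else pvLogicLoopA ls logic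

def extract_py_summary (lines : List String) : List String × List String × List String × List String :=
  let classes := PySem.List.slice ((lines.filter (fun l => PySem.Str.startswith (PySem.Str.strip l) "class ")).map (fun l => PySem.Str.strip l)) none (some 5)
  let funcs := PySem.List.slice ((lines.filter (fun l => PySem.Str.startswith (PySem.Str.strip l) "def ")).map (fun l => PySem.Str.strip l)) none (some 5)
  let imports := PySem.List.slice ((lines.filter (fun l => PySem.Str.startswith (PySem.Str.strip l) "import " || PySem.Str.startswith (PySem.Str.strip l) "from ")).map (fun l => PySem.Str.strip l)) none (some 5)
  let logic := pvLogicLoopA lines []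
  (classes, funcs, imports, logic)

-- ===== PORT B =====

-- single pass with four capped accumulators (B's loop body, line by line)
def pvScanB : List String → List String → List String → List String → List String →
    List String × List String × List String × List String
  | [], c, f, i, g => (c, f, i, g)
  | l :: ls, c, f, i, g =>
    let s := PySem.Str.strip l
    let c' := if c.length < 5 && PySem.Str.startswith s "class " then c ++ [s] else c
    let f' := if f.length < 5 && PySem.Str.startswith s "def " then f ++ [s] else f
    let i' := if i.length < 5 && (PySem.Str.startswith s "import " || PySem.Str.startswith s "from ") then i ++ [s] else i
    let g' := if g.length < 5 && pvHasKw s then g ++ [PySem.Str.slice s none (some 80)] else g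
    pvScanB ls c' f' i' g'

def extract_py_summary_alt (lines : List String) : List String × List String × List String × List String :=
  pvScanB lines [] [] [] []

-- ===== PRECONDITION & SPEC =====
def Spec_extract_py_summary (lines : List String) (out : List String × List String × List String × List String) : Prop := out = extract_py_summary_alt lines
instance (lines : List String) (out : List String × List String × List String × List String) : Decidable (Spec_extract_py_summary lines out) := by unfold Spec_extract_py_summary; infer_instance

-- ===== CLAIM (what is proved, stated in full; the proofs are below) =====
def Claim_equal_extract_py_summary : Prop := ∀ (lines : List String), Dom_extract_py_summary lines → Spec_extract_py_summary lines (extract_py_summary lines)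

-- ===== LEMMAS AND PROOFS =====

-- what each accumulator collects, as a filtered/mapped list over the stripped lines
def pvSel (p : String → Bool) (m : String → String) (lines : List String) : List String :=
  ((lines.map (fun l => PySem.Str.strip l)).filter p).map m

-- one capped-append step versus take on the filtered list
theorem pv_capStep {α : Type} (b : Bool) (acc rest : List α) (x : α) :
    (if decide (acc.length < 5) && b then acc ++ [x] else acc) ++
      rest.take (5 - (if decide (acc.length < 5) && b then acc ++ [x] else acc).length)
    = acc ++ (if b then x :: rest else rest).take (5 - acc.length) := by
  cases b with
  | false => simp
  | true =>
    by_cases h : acc.length < 5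
    · have h5 : 5 - acc.length = (5 - (acc.length + 1)) + 1 := by omega
      simp [h, h5]
    · have h5 : 5 - acc.length = 0 := by omega
      simp [h, h5]

theorem pv_selStep (p : String → Bool) (m : String → String) (l : String) (ls : List String) :
    pvSel p m (l :: ls) = if p (PySem.Str.strip l) then m (PySem.Str.strip l) :: pvSel p m ls else pvSel p m ls := by
  simp [pvSel, List.filter_cons]
  split <;> simp

theorem pvScanB_eq (lines : List String) : ∀ (c f i g : List String),
    pvScanB lines c f i g =
      (c ++ (pvSel (fun s => PySem.Str.startswith s "class ") id lines).take (5 - c.length),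
       f ++ (pvSel (fun s => PySem.Str.startswith s "def ") id lines).take (5 - f.length),
       i ++ (pvSel (fun s => PySem.Str.startswith s "import " || PySem.Str.startswith s "from ") id lines).take (5 - i.length),
       g ++ (pvSel pvHasKw (fun s => PySem.Str.slice s none (some 80)) lines).take (5 - g.length)) := by
  induction lines with
  | nil => intro c f i g; simp [pvScanB, pvSel]
  | cons l ls ih =>
    intro c f i g
    rw [pvScanB, ih]
    refine Prod.ext ?_ (Prod.ext ?_ (Prod.ext ?_ ?_)) <;> simp only [pv_selStep, id]
    · exact pv_capStep (PySem.Str.startswith (PySem.Str.strip l) "class ") c _ _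
    · exact pv_capStep (PySem.Str.startswith (PySem.Str.strip l) "def ") f _ _
    · exact pv_capStep (PySem.Str.startswith (PySem.Str.strip l) "import " || PySem.Str.startswith (PySem.Str.strip l) "from ") i _ _
    · exact pv_capStep (pvHasKw (PySem.Str.strip l)) g _ _

theorem pvLogicLoopA_eq (lines : List String) : ∀ (acc : List String), acc.length < 5 →
    pvLogicLoopA lines acc = acc ++ (pvSel pvHasKw (fun s => PySem.Str.slice s none (some 80)) lines).take (5 - acc.length) := by
  induction lines with
  | nil => intro acc _; simp [pvLogicLoopA, pvSel]
  | cons l ls ih =>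
    intro acc hacc
    rw [pvLogicLoopA, pv_selStep]
    by_cases hk : pvHasKw (PySem.Str.strip l)
    · simp only [hk, if_true]
      by_cases h5 : 5 ≤ (acc ++ [PySem.Str.slice (PySem.Str.strip l) none (some 80)]).length
      · simp only [h5, if_true]
        have h1 : 5 - acc.length = 1 := by simp at h5; omega
        simp [h1]
      · simp only [h5, if_false]
        rw [ih _ (by simp at h5 ⊢; omega)]
        have h2 : 5 - acc.length = (5 - (acc.length + 1)) + 1 := by simp at h5; omega
        simp [h2]
    · simp only [hk, Bool.false_eq_true, if_false]
      exact ih acc hacc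

-- ===== VERDICT (by name: the statement is the Claim_ definition above) =====
theorem extract_py_summary_spec : Claim_equal_extract_py_summary := by
  intro lines _
  unfold Spec_extract_py_summary extract_py_summary extract_py_summary_alt
  rw [pvScanB_eq]
  rw [pvLogicLoopA_eq lines [] (by simp)]
  have h5 : ∀ (xs : List String), PySem.List.slice xs none (some 5) = xs.take 5 := fun xs => by
    have := PySem.List.slice_to (xs := xs) (b := 5) (by norm_num)
    simpa using this
  simp [pvSel, h5, List.filter_map, Function.comp_def]
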